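-- pv_equiv track=rewrite | github.com/Hammad123454321/SaaS-Platform | backend/app/services/ai/task_generator.py | _generate_basic_description
-- ===== SOURCE A (Python) =====
-- def _generate_basic_description(title: str) -> str:
--     """Generate a basic description from the title."""
--     title_lower = title.lower()
--
--     # Common task patterns
--     if any(word in title_lower for word in ["review", "check", "verify"]):
--         return f"Review and verify the following: {title}. Document any findings and take necessary actions."
--
--     if any(word in title_lower for word in ["create", "set up", "setup", "build"]):
--         return f"Set up and configure: {title}. Ensure all requirements are met and document the process."
--
--     if any(word in title_lower for word in ["meeting", "call", "discuss"]):
--         return f"Schedule and prepare for: {title}. Create an agenda and send invitations to relevant participants."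
--
--     if any(word in title_lower for word in ["update", "modify", "change"]):
--         return f"Update the following: {title}. Review current state, make necessary changes, and verify results."
--
--     if any(word in title_lower for word in ["report", "document", "write"]):
--         return f"Create documentation for: {title}. Include all relevant details and share with stakeholders."
--
--     if any(word in title_lower for word in ["fix", "resolve", "bug"]):
--         return f"Investigate and resolve: {title}. Document the root cause and solution implemented."
--
--     if any(word in title_lower for word in ["train", "onboard", "teach"]):
--         return f"Complete training for: {title}. Prepare materials and ensure understanding of key concepts."
--
--     # Default
--     return f"Complete the following task: {title}. Review requirements, execute the work, and document completion."
-- ===== SOURCE B (Python) =====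
-- # One left-to-right scan of the lowered title, dispatching each position through a
-- # first-character bucket index (keyword -> category map grouped by initial letter);
-- # the minimum category seen selects the sentence parts from an indexed table.
-- _KEYWORD_CATEGORY = {
--     "review": 0, "check": 0, "verify": 0,
--     "create": 1, "set up": 1, "setup": 1, "build": 1,
--     "meeting": 2, "call": 2, "discuss": 2,
--     "update": 3, "modify": 3, "change": 3,
--     "report": 4, "document": 4, "write": 4,
--     "fix": 5, "resolve": 5, "bug": 5,
--     "train": 6, "onboard": 6, "teach": 6,
-- }
--
-- _BY_FIRST = {}
-- for _kw, _cat in _KEYWORD_CATEGORY.items():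
--     _BY_FIRST.setdefault(_kw[0], []).append((_kw, _cat))
--
-- _PARTS = [
--     ("Review and verify the following: ", ". Document any findings and take necessary actions."),
--     ("Set up and configure: ", ". Ensure all requirements are met and document the process."),
--     ("Schedule and prepare for: ", ". Create an agenda and send invitations to relevant participants."),
--     ("Update the following: ", ". Review current state, make necessary changes, and verify results."),
--     ("Create documentation for: ", ". Include all relevant details and share with stakeholders."),
--     ("Investigate and resolve: ", ". Document the root cause and solution implemented."),
--     ("Complete training for: ", ". Prepare materials and ensure understanding of key concepts."),
--     ("Complete the following task: ", ". Review requirements, execute the work, and document completion."),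
-- ]
--
--
-- def _generate_basic_description(title: str) -> str:
--     """Generate a basic description from the title."""
--     t = title.lower()
--     best = 7
--     for i in range(len(t)):
--         for kw, cat in _BY_FIRST.get(t[i], ()):
--             if cat < best and t.startswith(kw, i):
--                 best = cat
--     pre, suf = _PARTS[best]
--     return pre + title + suf
-- ===== Notes on version B (the rewrite author's own statement) =====
-- stated objective: alternative
-- what changed: Replaced the keyword-group if-chain of substring tests by a single left-to-right scan of the lowered title that dispatches each position through a first-character bucket index of a flat keyword->category map, keeps the minimum matched category, and assembles the answer from an indexed table of sentence parts.
import Mathlib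
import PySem

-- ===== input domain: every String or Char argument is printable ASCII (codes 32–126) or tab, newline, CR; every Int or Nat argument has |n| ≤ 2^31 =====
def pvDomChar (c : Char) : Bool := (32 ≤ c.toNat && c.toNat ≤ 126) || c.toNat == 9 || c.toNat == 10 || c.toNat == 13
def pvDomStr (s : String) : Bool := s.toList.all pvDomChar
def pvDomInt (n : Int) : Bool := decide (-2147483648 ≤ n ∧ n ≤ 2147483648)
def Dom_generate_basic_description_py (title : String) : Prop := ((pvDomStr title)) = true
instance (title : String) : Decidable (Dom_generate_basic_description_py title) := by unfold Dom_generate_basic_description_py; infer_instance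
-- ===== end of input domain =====

-- B replaces A's group-by-group 'any keyword in title' if-chain by one left-to-right scan of the
-- lowered title through a first-character bucket index of a flat keyword->category map, keeping the
-- minimum category seen (alternative algorithm and data structure, similar cost).

-- ===== PORT A =====
-- literal transliteration of A's if-chain; f-strings ported as (prefix ++ title ++ suffix)
def generate_basic_description_py (title : String) : String :=
  let title_lower := PySem.Str.lower title
  if (["review", "check", "verify"] : List String).any (fun w => PySem.Str.isIn w title_lower) then
    "Review and verify the following: " ++ title ++ ". Document any findings and take necessary actions."
  else if (["create", "set up", "setup", "build"] : List String).any (fun w => PySem.Str.isIn w title_lower) then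
    "Set up and configure: " ++ title ++ ". Ensure all requirements are met and document the process."
  else if (["meeting", "call", "discuss"] : List String).any (fun w => PySem.Str.isIn w title_lower) then
    "Schedule and prepare for: " ++ title ++ ". Create an agenda and send invitations to relevant participants."
  else if (["update", "modify", "change"] : List String).any (fun w => PySem.Str.isIn w title_lower) then
    "Update the following: " ++ title ++ ". Review current state, make necessary changes, and verify results."
  else if (["report", "document", "write"] : List String).any (fun w => PySem.Str.isIn w title_lower) then
    "Create documentation for: " ++ title ++ ". Include all relevant details and share with stakeholders."
  else if (["fix", "resolve", "bug"] : List String).any (fun w => PySem.Str.isIn w title_lower) then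
    "Investigate and resolve: " ++ title ++ ". Document the root cause and solution implemented."
  else if (["train", "onboard", "teach"] : List String).any (fun w => PySem.Str.isIn w title_lower) then
    "Complete training for: " ++ title ++ ". Prepare materials and ensure understanding of key concepts."
  else
    "Complete the following task: " ++ title ++ ". Review requirements, execute the work, and document completion."

-- ===== PORT B =====
-- Source B's module-level dict _BY_FIRST (first character -> keywords of _KEYWORD_CATEGORY starting
-- with it, in dict order), hand-ported as the fixed mapping it evaluates to at import time;
-- _BY_FIRST.get(ch, ()) is the '_ => []' default arm (exact)
def pvBucket (c : Char) : List (List Char × Nat) :=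
  match c with
  | 'r' => [("review".toList, 0), ("report".toList, 4), ("resolve".toList, 5)]
  | 'c' => [("check".toList, 0), ("create".toList, 1), ("call".toList, 2), ("change".toList, 3)]
  | 'v' => [("verify".toList, 0)]
  | 's' => [("set up".toList, 1), ("setup".toList, 1)]
  | 'b' => [("build".toList, 1), ("bug".toList, 5)]
  | 'm' => [("meeting".toList, 2), ("modify".toList, 3)]
  | 'd' => [("discuss".toList, 2), ("document".toList, 4)]
  | 'u' => [("update".toList, 3)]
  | 'w' => [("write".toList, 4)]
  | 'f' => [("fix".toList, 5)]
  | 't' => [("train".toList, 6), ("teach".toList, 6)]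
  | 'o' => [("onboard".toList, 6)]
  | _ => []

-- Source B's _PARTS table
def pvParts : List (String × String) :=
  [ ("Review and verify the following: ", ". Document any findings and take necessary actions."),
    ("Set up and configure: ", ". Ensure all requirements are met and document the process."),
    ("Schedule and prepare for: ", ". Create an agenda and send invitations to relevant participants."),
    ("Update the following: ", ". Review current state, make necessary changes, and verify results."),
    ("Create documentation for: ", ". Include all relevant details and share with stakeholders."),
    ("Investigate and resolve: ", ". Document the root cause and solution implemented."),
    ("Complete training for: ", ". Prepare materials and ensure understanding of key concepts."),
    ("Complete the following task: ", ". Review requirements, execute the work, and document completion.") ]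

-- the inner loop body: 'if cat < best and t.startswith(kw, i): best = cat'
-- (t.startswith(kw, i) for the Nat loop index i ≤ len(t) is 'kw is a prefix of t.drop i' — exact)
def pvStep (t : List Char) (i : Nat) (b : Nat) (kc : List Char × Nat) : Nat :=
  if kc.2 < b ∧ PySem.Chars.startswith (t.drop i) kc.1 = true then kc.2 else b

def generate_basic_description_py_alt (title : String) : String :=
  let t := PySem.Chars.lower title.toList           -- t = title.lower()
  -- for i in range(len(t)): for kw, cat in _BY_FIRST.get(t[i], ()): …
  -- (t[i] for i < len(t) is t.getD i ' ' — the default is never read)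
  let best := (List.range t.length).foldl
    (fun b i => (pvBucket (t.getD i ' ')).foldl (pvStep t i) b) 7
  let p := pvParts.getD best ("", "")               -- _PARTS[best]; best ≤ 7 always holds
  p.1 ++ title ++ p.2

-- ===== PRECONDITION & SPEC =====
def Spec_generate_basic_description_py (title : String) (out : String) : Prop := out = generate_basic_description_py_alt title
instance (title : String) (out : String) : Decidable (Spec_generate_basic_description_py title out) := by unfold Spec_generate_basic_description_py; infer_instance

-- ===== CLAIM =====
def Claim_equal_generate_basic_description_py : Prop := ∀ (title : String), Dom_generate_basic_description_py title → Spec_generate_basic_description_py title (generate_basic_description_py title)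

-- ===== LEMMAS AND PROOFS =====

-- proof-side: the flat keyword -> category list (Source B's _KEYWORD_CATEGORY; the union of all buckets)
def pvKw : List (List Char × Nat) :=
  [ ("review".toList, 0), ("check".toList, 0), ("verify".toList, 0),
    ("create".toList, 1), ("set up".toList, 1), ("setup".toList, 1), ("build".toList, 1),
    ("meeting".toList, 2), ("call".toList, 2), ("discuss".toList, 2),
    ("update".toList, 3), ("modify".toList, 3), ("change".toList, 3),
    ("report".toList, 4), ("document".toList, 4), ("write".toList, 4),
    ("fix".toList, 5), ("resolve".toList, 5), ("bug".toList, 5),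
    ("train".toList, 6), ("onboard".toList, 6), ("teach".toList, 6) ]

-- proof-side: 'some word of ws occurs in t', and the first-matching-group selector
def pvCond (t : List Char) (ws : List (List Char)) : Bool := ws.any (fun w => decide (w <:+: t))

def pvPick (t : List Char) : Nat :=
  if pvCond t ["review".toList, "check".toList, "verify".toList] then 0
  else if pvCond t ["create".toList, "set up".toList, "setup".toList, "build".toList] then 1
  else if pvCond t ["meeting".toList, "call".toList, "discuss".toList] then 2
  else if pvCond t ["update".toList, "modify".toList, "change".toList] then 3
  else if pvCond t ["report".toList, "document".toList, "write".toList] then 4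
  else if pvCond t ["fix".toList, "resolve".toList, "bug".toList] then 5
  else if pvCond t ["train".toList, "onboard".toList, "teach".toList] then 6
  else 7

lemma pvStep_le (t : List Char) (i b : Nat) (kc : List Char × Nat) : pvStep t i b kc ≤ b := by
  unfold pvStep; split
  next h => exact Nat.le_of_lt h.1
  next => exact le_refl b

lemma pvInner_le (t : List Char) (i : Nat) : ∀ (L : List (List Char × Nat)) (b : Nat),
    L.foldl (pvStep t i) b ≤ b := by
  intro L
  induction L with
  | nil => intro b; exact le_refl b
  | cons a L ih =>
    intro b
    rw [List.foldl_cons]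
    exact le_trans (ih _) (pvStep_le t i b a)

lemma pvInner_mem_le (t : List Char) (i : Nat) (kw : List Char) (c : Nat)
    (hs : PySem.Chars.startswith (t.drop i) kw = true) :
    ∀ (L : List (List Char × Nat)) (b : Nat), (kw, c) ∈ L → L.foldl (pvStep t i) b ≤ c := by
  intro L
  induction L with
  | nil => intro b h; cases h
  | cons a L ih =>
    intro b h
    rw [List.foldl_cons]
    rcases List.mem_cons.mp h with h | h
    · subst h
      refine le_trans (pvInner_le t i L _) ?_
      unfold pvStep; split
      next => exact le_refl c
      next hn =>
        simp only [not_and] at hn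
        have hcb : ¬ c < b := fun hlt => (hn hlt) hs
        omega
    · exact ih _ h

lemma pvInner_P (t : List Char) (i : Nat) (P : Nat → Prop)
    (hKw : ∀ kc ∈ pvKw, PySem.Chars.startswith (t.drop i) kc.1 = true → P kc.2) :
    ∀ (L : List (List Char × Nat)), (∀ kc ∈ L, kc ∈ pvKw) → ∀ b, P b → P (L.foldl (pvStep t i) b) := by
  intro L
  induction L with
  | nil => intro _ b hb; exact hb
  | cons a L ih =>
    intro hsub b hb
    rw [List.foldl_cons]
    refine ih (fun kc h => hsub kc (List.mem_cons_of_mem a h)) _ ?_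
    unfold pvStep; split
    next h => exact hKw a (hsub a (by simp)) h.2
    next => exact hb

lemma pvBucket_sub : ∀ (ch : Char), ∀ kc ∈ pvBucket ch, kc ∈ pvKw := by
  intro ch
  unfold pvBucket
  split <;> decide

lemma pvKw_bucket : ∀ kc ∈ pvKw, kc ∈ pvBucket (kc.1.headD ' ') := by decide

lemma pvOuter_le (t : List Char) : ∀ (R : List Nat) (b : Nat),
    R.foldl (fun b i => (pvBucket (t.getD i ' ')).foldl (pvStep t i) b) b ≤ b := by
  intro R
  induction R with
  | nil => intro b; exact le_refl b
  | cons i R ih =>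
    intro b
    rw [List.foldl_cons]
    exact le_trans (ih _) (pvInner_le t i _ b)

lemma pvOuter_mem_le (t : List Char) (kw : List Char) (c : Nat) (R : List Nat) (b i : Nat)
    (hi : i ∈ R) (hm : (kw, c) ∈ pvBucket (t.getD i ' '))
    (hs : PySem.Chars.startswith (t.drop i) kw = true) :
    R.foldl (fun b i => (pvBucket (t.getD i ' ')).foldl (pvStep t i) b) b ≤ c := by
  obtain ⟨l1, l2, rfl⟩ := List.append_of_mem hi
  rw [List.foldl_append, List.foldl_cons]
  exact le_trans (pvOuter_le t l2 _) (pvInner_mem_le t i kw c hs _ _ hm)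

lemma pvOuter_P (t : List Char) (P : Nat → Prop)
    (hKw : ∀ (i : Nat), ∀ kc ∈ pvKw, PySem.Chars.startswith (t.drop i) kc.1 = true → P kc.2) :
    ∀ (R : List Nat) (b : Nat), P b →
      P (R.foldl (fun b i => (pvBucket (t.getD i ' ')).foldl (pvStep t i) b) b) := by
  intro R
  induction R with
  | nil => intro b hb; exact hb
  | cons i R ih =>
    intro b hb
    rw [List.foldl_cons]
    exact ih _ (pvInner_P t i P (hKw i) _ (fun kc h => pvBucket_sub _ kc h) b hb)

lemma pvSw_infix (t kw : List Char) (i : Nat)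
    (h : PySem.Chars.startswith (t.drop i) kw = true) : kw <:+: t := by
  have hp : kw <+: t.drop i := by
    simpa [PySem.Chars.startswith, List.isPrefixOf_iff_prefix] using h
  exact hp.isInfix.trans (List.drop_suffix i t).isInfix

lemma pvInfix_pos (t kw : List Char) (hkw : kw ≠ []) (h : kw <:+: t) :
    ∃ i, i ∈ List.range t.length ∧ PySem.Chars.startswith (t.drop i) kw = true := by
  obtain ⟨s, u, rfl⟩ := h
  refine ⟨s.length, List.mem_range.mpr ?_, ?_⟩
  · have h1 : 1 ≤ kw.length := by
      cases kw with
      | nil => exact absurd rfl hkw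
      | cons a l => simp
    simp only [List.length_append]
    omega
  · rw [List.append_assoc, List.drop_left]
    simp [PySem.Chars.startswith, List.isPrefixOf_iff_prefix]

-- the character the scan dispatches on at a position where kw matches is kw's own first character
lemma pvGetD_eq_headD (t kw : List Char) (i : Nat) (hkw : kw ≠ [])
    (hs : PySem.Chars.startswith (t.drop i) kw = true) :
    t.getD i ' ' = kw.headD ' ' := by
  have hp : kw <+: t.drop i := by
    simpa [PySem.Chars.startswith, List.isPrefixOf_iff_prefix] using hs
  cases kw with
  | nil => exact absurd rfl hkw
  | cons a l =>
    obtain ⟨u, hu⟩ := hp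
    have hdrop : t.drop i = a :: (l ++ u) := by simpa using hu.symm
    have : t[i]? = some a := by
      rw [← List.head?_drop, hdrop]; rfl
    simp [List.getD_eq_getElem?_getD, this]

lemma pvKw_ne_nil : ∀ kc ∈ pvKw, kc.1 ≠ ([] : List Char) := by decide

lemma pvKw_cat_lt : ∀ kc ∈ pvKw, kc.2 < 7 := by decide

lemma pvG0 (t : List Char) : (∃ kw, (kw, 0) ∈ pvKw ∧ kw <:+: t) ↔ pvCond t ["review".toList, "check".toList, "verify".toList] = true := by
  simp [pvKw, pvCond]

lemma pvG1 (t : List Char) : (∃ kw, (kw, 1) ∈ pvKw ∧ kw <:+: t) ↔ pvCond t ["create".toList, "set up".toList, "setup".toList, "build".toList] = true := by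
  simp [pvKw, pvCond]

lemma pvG2 (t : List Char) : (∃ kw, (kw, 2) ∈ pvKw ∧ kw <:+: t) ↔ pvCond t ["meeting".toList, "call".toList, "discuss".toList] = true := by
  simp [pvKw, pvCond]

lemma pvG3 (t : List Char) : (∃ kw, (kw, 3) ∈ pvKw ∧ kw <:+: t) ↔ pvCond t ["update".toList, "modify".toList, "change".toList] = true := by
  simp [pvKw, pvCond]

lemma pvG4 (t : List Char) : (∃ kw, (kw, 4) ∈ pvKw ∧ kw <:+: t) ↔ pvCond t ["report".toList, "document".toList, "write".toList] = true := by
  simp [pvKw, pvCond]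

lemma pvG5 (t : List Char) : (∃ kw, (kw, 5) ∈ pvKw ∧ kw <:+: t) ↔ pvCond t ["fix".toList, "resolve".toList, "bug".toList] = true := by
  simp [pvKw, pvCond]

lemma pvG6 (t : List Char) : (∃ kw, (kw, 6) ∈ pvKw ∧ kw <:+: t) ↔ pvCond t ["train".toList, "onboard".toList, "teach".toList] = true := by
  simp [pvKw, pvCond]

lemma pvBest_eq (t : List Char) :
    (List.range t.length).foldl
      (fun b i => (pvBucket (t.getD i ' ')).foldl (pvStep t i) b) 7 = pvPick t := by
  set best := (List.range t.length).foldl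
      (fun b i => (pvBucket (t.getD i ' ')).foldl (pvStep t i) b) 7 with hbdef
  have hle : best ≤ 7 := pvOuter_le t _ 7
  have hP : best = 7 ∨ ∃ kw, (kw, best) ∈ pvKw ∧ kw <:+: t := by
    refine pvOuter_P t (fun b => b = 7 ∨ ∃ kw, (kw, b) ∈ pvKw ∧ kw <:+: t) ?_ _ 7 (Or.inl rfl)
    intro i kc hm hs
    exact Or.inr ⟨kc.1, by simpa using hm, pvSw_infix t kc.1 i hs⟩
  have hmin : ∀ (kw : List Char) (c : Nat), (kw, c) ∈ pvKw → kw <:+: t → best ≤ c := by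
    intro kw c hm hi
    obtain ⟨i, hiR, hs⟩ := pvInfix_pos t kw (pvKw_ne_nil _ hm) hi
    have hb : (kw, c) ∈ pvBucket (t.getD i ' ') := by
      rw [pvGetD_eq_headD t kw i (pvKw_ne_nil _ hm) hs]
      exact pvKw_bucket _ hm
    exact pvOuter_mem_le t kw c _ 7 i hiR hb hs
  clear_value best
  clear hbdef
  unfold pvPick
  split_ifs with h0 h1 h2 h3 h4 h5 h6
  · obtain ⟨kw, hm, hi⟩ := (pvG0 t).mpr h0
    have hub : best ≤ 0 := hmin kw 0 hm hi
    rcases hP with h7 | ⟨kw', hm', hi'⟩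
    · omega
    · have hsplit : best = 0 := by omega
      rcases hsplit with hj
      · omega
  · obtain ⟨kw, hm, hi⟩ := (pvG1 t).mpr h1
    have hub : best ≤ 1 := hmin kw 1 hm hi
    rcases hP with h7 | ⟨kw', hm', hi'⟩
    · omega
    · have hsplit : best = 0 ∨ best = 1 := by omega
      rcases hsplit with hj | hj
      · rw [hj] at hm'; exact absurd ((pvG0 t).mp ⟨kw', hm', hi'⟩) h0
      · omega
  · obtain ⟨kw, hm, hi⟩ := (pvG2 t).mpr h2
    have hub : best ≤ 2 := hmin kw 2 hm hi
    rcases hP with h7 | ⟨kw', hm', hi'⟩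
    · omega
    · have hsplit : best = 0 ∨ best = 1 ∨ best = 2 := by omega
      rcases hsplit with hj | hj | hj
      · rw [hj] at hm'; exact absurd ((pvG0 t).mp ⟨kw', hm', hi'⟩) h0
      · rw [hj] at hm'; exact absurd ((pvG1 t).mp ⟨kw', hm', hi'⟩) h1
      · omega
  · obtain ⟨kw, hm, hi⟩ := (pvG3 t).mpr h3
    have hub : best ≤ 3 := hmin kw 3 hm hi
    rcases hP with h7 | ⟨kw', hm', hi'⟩
    · omega
    · have hsplit : best = 0 ∨ best = 1 ∨ best = 2 ∨ best = 3 := by omega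
      rcases hsplit with hj | hj | hj | hj
      · rw [hj] at hm'; exact absurd ((pvG0 t).mp ⟨kw', hm', hi'⟩) h0
      · rw [hj] at hm'; exact absurd ((pvG1 t).mp ⟨kw', hm', hi'⟩) h1
      · rw [hj] at hm'; exact absurd ((pvG2 t).mp ⟨kw', hm', hi'⟩) h2
      · omega
  · obtain ⟨kw, hm, hi⟩ := (pvG4 t).mpr h4
    have hub : best ≤ 4 := hmin kw 4 hm hi
    rcases hP with h7 | ⟨kw', hm', hi'⟩
    · omega
    · have hsplit : best = 0 ∨ best = 1 ∨ best = 2 ∨ best = 3 ∨ best = 4 := by omega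
      rcases hsplit with hj | hj | hj | hj | hj
      · rw [hj] at hm'; exact absurd ((pvG0 t).mp ⟨kw', hm', hi'⟩) h0
      · rw [hj] at hm'; exact absurd ((pvG1 t).mp ⟨kw', hm', hi'⟩) h1
      · rw [hj] at hm'; exact absurd ((pvG2 t).mp ⟨kw', hm', hi'⟩) h2
      · rw [hj] at hm'; exact absurd ((pvG3 t).mp ⟨kw', hm', hi'⟩) h3
      · omega
  · obtain ⟨kw, hm, hi⟩ := (pvG5 t).mpr h5
    have hub : best ≤ 5 := hmin kw 5 hm hi
    rcases hP with h7 | ⟨kw', hm', hi'⟩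
    · omega
    · have hsplit : best = 0 ∨ best = 1 ∨ best = 2 ∨ best = 3 ∨ best = 4 ∨ best = 5 := by omega
      rcases hsplit with hj | hj | hj | hj | hj | hj
      · rw [hj] at hm'; exact absurd ((pvG0 t).mp ⟨kw', hm', hi'⟩) h0
      · rw [hj] at hm'; exact absurd ((pvG1 t).mp ⟨kw', hm', hi'⟩) h1
      · rw [hj] at hm'; exact absurd ((pvG2 t).mp ⟨kw', hm', hi'⟩) h2
      · rw [hj] at hm'; exact absurd ((pvG3 t).mp ⟨kw', hm', hi'⟩) h3
      · rw [hj] at hm'; exact absurd ((pvG4 t).mp ⟨kw', hm', hi'⟩) h4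
      · omega
  · obtain ⟨kw, hm, hi⟩ := (pvG6 t).mpr h6
    have hub : best ≤ 6 := hmin kw 6 hm hi
    rcases hP with h7 | ⟨kw', hm', hi'⟩
    · omega
    · have hsplit : best = 0 ∨ best = 1 ∨ best = 2 ∨ best = 3 ∨ best = 4 ∨ best = 5 ∨ best = 6 := by omega
      rcases hsplit with hj | hj | hj | hj | hj | hj | hj
      · rw [hj] at hm'; exact absurd ((pvG0 t).mp ⟨kw', hm', hi'⟩) h0
      · rw [hj] at hm'; exact absurd ((pvG1 t).mp ⟨kw', hm', hi'⟩) h1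
      · rw [hj] at hm'; exact absurd ((pvG2 t).mp ⟨kw', hm', hi'⟩) h2
      · rw [hj] at hm'; exact absurd ((pvG3 t).mp ⟨kw', hm', hi'⟩) h3
      · rw [hj] at hm'; exact absurd ((pvG4 t).mp ⟨kw', hm', hi'⟩) h4
      · rw [hj] at hm'; exact absurd ((pvG5 t).mp ⟨kw', hm', hi'⟩) h5
      · omega
  · rcases hP with h7 | ⟨kw', hm', hi'⟩
    · exact h7
    · have hlt : best < 7 := pvKw_cat_lt _ hm'
      have hsplit : best = 0 ∨ best = 1 ∨ best = 2 ∨ best = 3 ∨ best = 4 ∨ best = 5 ∨ best = 6 := by omega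
      rcases hsplit with hj | hj | hj | hj | hj | hj | hj
      · rw [hj] at hm'; exact absurd ((pvG0 t).mp ⟨kw', hm', hi'⟩) h0
      · rw [hj] at hm'; exact absurd ((pvG1 t).mp ⟨kw', hm', hi'⟩) h1
      · rw [hj] at hm'; exact absurd ((pvG2 t).mp ⟨kw', hm', hi'⟩) h2
      · rw [hj] at hm'; exact absurd ((pvG3 t).mp ⟨kw', hm', hi'⟩) h3
      · rw [hj] at hm'; exact absurd ((pvG4 t).mp ⟨kw', hm', hi'⟩) h4
      · rw [hj] at hm'; exact absurd ((pvG5 t).mp ⟨kw', hm', hi'⟩) h5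
      · rw [hj] at hm'; exact absurd ((pvG6 t).mp ⟨kw', hm', hi'⟩) h6

lemma pvCondA_eq (title : String) (ws : List String) :
    (ws.any fun w => PySem.Str.isIn w (PySem.Str.lower title))
      = pvCond (PySem.Chars.lower title.toList) (ws.map String.toList) := by
  rw [Bool.eq_iff_iff]
  simp [pvCond, List.any_eq_true, PySem.Chars.isIn_iff_infix, PySem.Str.toList_lower]

-- ===== VERDICT =====
theorem generate_basic_description_py_spec : Claim_equal_generate_basic_description_py := by
  intro title _
  unfold Spec_generate_basic_description_py
  simp only [generate_basic_description_py, generate_basic_description_py_alt]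
  rw [pvBest_eq]
  simp only [pvCondA_eq, List.map]
  unfold pvPick
  split_ifs <;> rfl
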